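-- pv_equiv track=rewrite | github.com/fk0u/HambaLang | ctf/hell_mode.py | _obfuscate_text
-- ===== SOURCE A (Python) =====
-- def _obfuscate_text(text: str) -> str:
--     """Simple ROT13-like obfuscation"""
--     result = []
--     for char in text:
--         if char.isalpha():
--             base = ord('A') if char.isupper() else ord('a')
--             result.append(chr((ord(char) - base + 13) % 26 + base))
--         else:
--             result.append(char)
--     return ''.join(result)
-- ===== SOURCE B (Python) =====
-- _U = "ABCDEFGHIJKLMNOPQRSTUVWXYZ"
-- _RU = _U[13:] + _U[:13]
-- _TABLE = str.maketrans(_U + _U.lower(), _RU + _RU.lower())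
--
-- def _obfuscate_text(text: str) -> str:
--     return text.translate(_TABLE)
-- ===== Notes on version B (the rewrite author's own statement) =====
-- stated objective: idiomatic
-- what changed: Replaces the per-character isalpha/isupper branching and modular arithmetic with a fixed ROT13 translation table built once via str.maketrans and a single text.translate pass.
import Mathlib
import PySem

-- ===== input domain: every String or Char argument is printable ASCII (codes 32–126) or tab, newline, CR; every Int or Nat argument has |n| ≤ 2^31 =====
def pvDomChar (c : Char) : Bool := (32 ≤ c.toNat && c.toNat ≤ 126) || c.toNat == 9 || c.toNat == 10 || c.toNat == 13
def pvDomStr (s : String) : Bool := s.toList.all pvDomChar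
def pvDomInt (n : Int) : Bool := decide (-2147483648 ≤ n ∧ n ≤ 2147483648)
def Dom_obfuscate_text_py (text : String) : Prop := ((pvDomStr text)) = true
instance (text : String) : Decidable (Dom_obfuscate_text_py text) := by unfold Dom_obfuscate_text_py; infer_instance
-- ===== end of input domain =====

-- B replaces A's per-character branching and modular arithmetic with a single
-- precomputed ROT13 translation table and one table-lookup pass (idiomatic, same cost).

-- ===== PORT A =====
-- literal transliteration of A: accumulate a list, branch on isalpha/isupper, modular arithmetic
def obfuscate_text_py (text : String) : String :=
  let result : List Char :=
    text.toList.foldl (fun (result : List Char) (char : Char) =>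
      if PySem.Chars.isalpha char then
        let base : Int := if PySem.Chars.isupper char then 65 else 97
        result ++ [Char.ofNat (PySem.Int.mod ((char.toNat : Int) - base + 13) 26 + base).toNat]
      else
        result ++ [char]) []
  String.mk result

-- ===== PORT B =====
-- the translation table built once from the rotated alphabets (= str.maketrans in Source B)
def pvRotTable : List (Char × Char) :=
  List.zip ("ABCDEFGHIJKLMNOPQRSTUVWXYZ".toList ++ "abcdefghijklmnopqrstuvwxyz".toList)
           ("NOPQRSTUVWXYZABCDEFGHIJKLM".toList ++ "nopqrstuvwxyzabcdefghijklm".toList)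

-- text.translate(table): map each char through the table, unmapped chars pass through
def obfuscate_text_py_alt (text : String) : String :=
  String.mk (text.toList.map (fun c => (pvRotTable.lookup c).getD c))

-- ===== PRECONDITION & SPEC =====
def Spec_obfuscate_text_py (text : String) (out : String) : Prop := out = obfuscate_text_py_alt text
instance (text : String) (out : String) : Decidable (Spec_obfuscate_text_py text out) := by unfold Spec_obfuscate_text_py; infer_instance

-- ===== CLAIM (what is proved, stated in full; the proofs are below) =====
def Claim_equal_obfuscate_text_py : Prop := ∀ (text : String), Dom_obfuscate_text_py text → Spec_obfuscate_text_py text (obfuscate_text_py text)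

-- ===== LEMMAS AND PROOFS =====

-- A's per-character step as a function
def pvStepA (char : Char) : Char :=
  if PySem.Chars.isalpha char then
    let base : Int := if PySem.Chars.isupper char then 65 else 97
    Char.ofNat (PySem.Int.mod ((char.toNat : Int) - base + 13) 26 + base).toNat
  else char

theorem pv_foldl_map (l : List Char) (acc : List Char) :
    l.foldl (fun (result : List Char) (char : Char) =>
      if PySem.Chars.isalpha char then
        let base : Int := if PySem.Chars.isupper char then 65 else 97
        result ++ [Char.ofNat (PySem.Int.mod ((char.toNat : Int) - base + 13) 26 + base).toNat]
      else
        result ++ [char]) acc = acc ++ l.map pvStepA := by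
  induction l generalizing acc with
  | nil => simp
  | cons c t ih =>
    simp only [List.foldl_cons, List.map_cons, ih, pvStepA]
    split_ifs <;> simp

-- per-character agreement on all domain characters, checked by `decide` on codes < 128
theorem pv_step_eq_ofNat : ∀ n ∈ List.range 128,
    pvStepA (Char.ofNat n) = ((pvRotTable.lookup (Char.ofNat n)).getD (Char.ofNat n)) := by
  set_option maxRecDepth 4096 in decide

theorem pv_step_eq (c : Char) (h : pvDomChar c = true) :
    pvStepA c = (pvRotTable.lookup c).getD c := by
  have hc : c.toNat < 128 := by
    simp [pvDomChar] at h
    omega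
  have := pv_step_eq_ofNat c.toNat (List.mem_range.mpr hc)
  simpa [Char.ofNat_toNat] using this

-- ===== VERDICT (by name: the statement is the Claim_ definition above) =====
theorem obfuscate_text_py_spec : Claim_equal_obfuscate_text_py := by
  intro text hdom
  unfold Spec_obfuscate_text_py obfuscate_text_py obfuscate_text_py_alt
  rw [pv_foldl_map]
  simp only [List.nil_append]
  congr 1
  apply List.map_congr_left
  intro c hc
  have : pvDomChar c = true := by
    have := hdom
    unfold Dom_obfuscate_text_py pvDomStr at this
    exact List.all_eq_true.mp this c hc
  exact pv_step_eq c this
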